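-- pv_equiv track=rewrite | github.com/destifo/CP-Codeforces | B. Remove Prefix/RemovePrefix.py | findMinMoves
-- ===== SOURCE A (Python) =====
-- def findMinMoves(nums):
--     moves = 0
--     duplicates = set()
--     count = {}
--
--     for num in nums:
--         count[num] = count.get(num, 0) + 1
--         if count[num] > 1:
--             duplicates.add(num)
--
--     l = 0
--     while len(duplicates) > 0:
--         moves +=1
--         num = nums[l]
--         count[num] -=1
--         if count[num] < 2 and num in duplicates:
--             duplicates.remove(num)
--         l +=1
--
--     return moves
-- ===== SOURCE B (Python) =====
-- def findMinMoves(nums):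
--     seen = set()
--     for j, x in enumerate(reversed(nums)):
--         if x in seen:
--             return len(nums) - j
--         seen.add(x)
--     return 0
-- ===== Notes on version B (the rewrite author's own statement) =====
-- stated objective: simpler
-- what changed: Replaced the count-dict build plus left-to-right removal loop by a single right-to-left scan with a seen-set that stops at the first repeated element.
import Mathlib
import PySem

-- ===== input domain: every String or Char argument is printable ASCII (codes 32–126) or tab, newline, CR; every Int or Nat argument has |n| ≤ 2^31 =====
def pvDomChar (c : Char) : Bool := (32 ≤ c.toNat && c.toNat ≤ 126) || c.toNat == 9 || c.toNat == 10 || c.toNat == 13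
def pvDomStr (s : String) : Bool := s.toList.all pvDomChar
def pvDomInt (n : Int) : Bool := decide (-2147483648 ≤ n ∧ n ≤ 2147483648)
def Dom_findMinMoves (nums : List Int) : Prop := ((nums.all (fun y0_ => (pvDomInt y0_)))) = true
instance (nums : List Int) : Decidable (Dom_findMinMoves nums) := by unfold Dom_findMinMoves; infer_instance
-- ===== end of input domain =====

-- B replaces A's count-dict build plus left-to-right removal loop by a single
-- right-to-left scan with a seen-set that stops at the first repeated element (objective: simpler).


-- ===== PORT A =====
-- A's while loop walks an index l through nums; the port consumes the same elements
-- structurally from the front of the remaining list (same values, same order).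
-- The '[] => moves' arm is a totality guard only: A's duplicates set always empties
-- before the index runs out, so Python never indexes out of range there.
def findMinMovesLoop (moves : Int) (count : PySem.Dict Int Int) (dups : PySem.Set Int) :
    List Int → Int
  | [] => moves  -- unreachable when the set is nonempty (Python would raise IndexError)
  | num :: rest' =>
    if PySem.Set.len dups > 0 then
      let count' := count.insert num (count.getD num 0 - 1)
      -- Python: 'if count[num] < 2 and num in duplicates: duplicates.remove(num)';
      -- remove on a member (guarded by 'num in duplicates') is exactly discard.
      let dups' := if count'.getD num 0 < 2 && PySem.Set.contains dups num then
          PySem.Set.discard dups num else dups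
      findMinMovesLoop (moves + 1) count' dups' rest'
    else moves

-- body of A's first for-loop: update the count dict, then maybe add to duplicates
def findMinMovesStep (cd : PySem.Dict Int Int × PySem.Set Int) (num : Int) :
    PySem.Dict Int Int × PySem.Set Int :=
  let c := cd.1.insert num (cd.1.getD num 0 + 1)
  (c, if c.getD num 0 > 1 then PySem.Set.add cd.2 num else cd.2)

def findMinMoves (nums : List Int) : Int :=
  let cd := nums.foldl findMinMovesStep (PySem.Dict.empty, PySem.Set.empty)
  findMinMovesLoop 0 cd.1 cd.2 nums

-- ===== PORT B =====
-- j counts processed elements of reversed(nums); collision at offset j returns len(nums) - j.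
def findMinMovesAltGo (n : Nat) (seen : PySem.Set Int) (j : Nat) : List Int → Int
  | [] => 0
  | x :: r => if PySem.Set.contains seen x then (n : Int) - (j : Int)
              else findMinMovesAltGo n (PySem.Set.add seen x) (j + 1) r

def findMinMoves_alt (nums : List Int) : Int :=
  findMinMovesAltGo nums.length PySem.Set.empty 0 nums.reverse

-- ===== PRECONDITION & SPEC =====
def Spec_findMinMoves (nums : List Int) (out : Int) : Prop := out = findMinMoves_alt nums
instance (nums : List Int) (out : Int) : Decidable (Spec_findMinMoves nums out) := by unfold Spec_findMinMoves; infer_instance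

-- ===== CLAIM (what is proved, stated in full; the proofs are below) =====
def Claim_equal_findMinMoves : Prop := ∀ (nums : List Int), Dom_findMinMoves nums → Spec_findMinMoves nums (findMinMoves nums)

-- ===== LEMMAS AND PROOFS =====

-- length of the shortest prefix whose removal leaves an all-distinct list
def minDrop : List Int → Nat
  | [] => 0
  | x :: xs => if (x :: xs).Nodup then 0 else minDrop xs + 1

lemma minDrop_of_nodup (l : List Int) (h : l.Nodup) : minDrop l = 0 := by
  cases l with
  | nil => rfl
  | cons x xs => simp [minDrop, h]

lemma minDrop_eq_of (v : List Int) (l : Nat) (h1 : (v.drop l).Nodup)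
    (h2 : ∀ k, k < l → ¬ (v.drop k).Nodup) : minDrop v = l := by
  induction v generalizing l with
  | nil =>
    cases l with
    | zero => rfl
    | succ m => exact absurd (by simp) (h2 0 (Nat.succ_pos m))
  | cons a v' ih =>
    cases l with
    | zero => exact minDrop_of_nodup _ h1
    | succ m =>
      have hnd : ¬ (a :: v').Nodup := h2 0 (Nat.succ_pos m)
      have : minDrop v' = m := by
        apply ih
        · simpa using h1
        · intro k hk
          simpa using h2 (k + 1) (by omega)
      simp [minDrop, hnd, this]

lemma buildA_spec (l : List Int) (d : PySem.Dict Int Int) (s : PySem.Set Int)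
    (hpos : ∀ y, 0 ≤ d.getD y 0) (x : Int) :
    ((l.foldl findMinMovesStep (d, s)).1.getD x 0 = d.getD x 0 + l.count x)
    ∧ ((x ∈ (l.foldl findMinMovesStep (d, s)).2) ↔
        x ∈ s ∨ (x ∈ l ∧ d.getD x 0 + l.count x > 1)) := by
  induction l generalizing d s with
  | nil => simp
  | cons y l' ih =>
    simp only [List.foldl_cons]
    set d1 := d.insert y (d.getD y 0 + 1) with hd1
    set s1 := if d1.getD y 0 > 1 then PySem.Set.add s y else s with hs1
    rw [show findMinMovesStep (d, s) y = (d1, s1) from rfl]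
    have hg1 : ∀ z, d1.getD z 0 = if z = y then d.getD y 0 + 1 else d.getD z 0 := by
      intro z; rw [hd1, PySem.Dict.getD_insert]
    have hpos1 : ∀ z, 0 ≤ d1.getD z 0 := by
      intro z; rw [hg1]; split_ifs with h
      · have := hpos y; omega
      · exact hpos z
    have hy : d1.getD y 0 = d.getD y 0 + 1 := by rw [hg1]; simp
    have hmem1 : x ∈ s1 ↔ x ∈ s ∨ (x = y ∧ 1 ≤ d.getD y 0) := by
      rw [hs1, hy]
      split_ifs with h
      · rw [PySem.Set.mem_add]; constructor
        · rintro (hx | hx)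
          · exact Or.inl hx
          · exact Or.inr ⟨hx, by omega⟩
        · rintro (hx | ⟨hx, _⟩)
          · exact Or.inl hx
          · exact Or.inr hx
      · constructor
        · exact Or.inl
        · rintro (hx | ⟨hx, hge⟩)
          · exact hx
          · omega
    obtain ⟨ihc, ihm⟩ := ih d1 s1 hpos1
    refine ⟨?_, ?_⟩
    · rw [ihc, hg1 x]
      by_cases hxy : x = y
      · subst hxy; rw [if_pos rfl, List.count_cons_self]; push_cast; ring
      · rw [if_neg hxy, List.count_cons_of_ne (Ne.symm hxy)]
    · rw [ihm, hmem1, hg1 x]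
      by_cases hxy : x = y
      · subst hxy
        have hky := hpos x
        rw [if_pos rfl]
        have hcc : (((x :: l').count x : Nat) : Int) = (l'.count x : Int) + 1 := by
          rw [List.count_cons_self]; push_cast; ring
        constructor
        · rintro ((hx | ⟨_, _⟩) | ⟨_, hgt⟩)
          · exact Or.inl hx
          · exact Or.inr ⟨List.mem_cons_self, by omega⟩
          · exact Or.inr ⟨List.mem_cons_self, by omega⟩
        · rintro (hx | ⟨_, hgt⟩)
          · exact Or.inl (Or.inl hx)
          · rw [hcc] at hgt
            by_cases hc1 : 1 ≤ d.getD x 0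
            · exact Or.inl (Or.inr ⟨rfl, hc1⟩)
            · have hcp : (1 : Int) ≤ (l'.count x : Int) := by omega
              have hl' : x ∈ l' := List.count_pos_iff.mp (by exact_mod_cast hcp)
              exact Or.inr ⟨hl', by omega⟩
      · rw [if_neg hxy, List.count_cons_of_ne (Ne.symm hxy)]
        constructor
        · rintro ((hx | ⟨hx, _⟩) | ⟨hx, hgt⟩)
          · exact Or.inl hx
          · exact absurd hx hxy
          · exact Or.inr ⟨List.mem_cons_of_mem _ hx, hgt⟩
        · rintro (hx | ⟨hx, hgt⟩)
          · exact Or.inl (Or.inl hx)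
          · rcases List.mem_cons.mp hx with h | h
            · exact absurd h hxy
            · exact Or.inr ⟨h, hgt⟩

lemma loopA_spec (rest : List Int) (count : PySem.Dict Int Int) (dups : PySem.Set Int)
    (moves : Int)
    (hc : ∀ x, count.getD x 0 = (rest.count x : Int))
    (hm : ∀ x, x ∈ dups ↔ 1 < rest.count x) :
    findMinMovesLoop moves count dups rest = moves + (minDrop rest : Int) := by
  induction rest generalizing count dups moves with
  | nil => simp [findMinMovesLoop, minDrop]
  | cons num rest' ih =>
    by_cases hnd : (num :: rest').Nodup
    · have hnil : dups = [] := by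
        apply List.eq_nil_iff_forall_not_mem.mpr
        intro x hx
        have h1 := (hm x).mp hx
        have h2 := List.nodup_iff_count_le_one.mp hnd x
        omega
      subst hnil
      rw [findMinMovesLoop, if_neg (by simp [PySem.Set.len]), minDrop_of_nodup _ hnd]
      ring
    · have hex : ∃ x, x ∈ dups := by
        have h := hnd
        rw [List.nodup_iff_count_le_one] at h
        push Not at h
        obtain ⟨x, hx⟩ := h
        exact ⟨x, (hm x).mpr hx⟩
      have hne : dups ≠ [] := by rintro rfl; simp at hex
      have hlen : PySem.Set.len dups > 0 := by
        have := List.length_pos_iff.mpr hne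
        unfold PySem.Set.len
        exact_mod_cast this
      rw [findMinMovesLoop, if_pos hlen]
      set count' := count.insert num (count.getD num 0 - 1) with hcount'
      have hc' : ∀ x, count'.getD x 0 = (rest'.count x : Int) := by
        intro x
        rw [hcount', PySem.Dict.getD_insert]
        split_ifs with h
        · subst h; rw [hc x, List.count_cons_self]; push_cast; ring
        · rw [hc x, List.count_cons_of_ne (Ne.symm h)]
      set dups' := if count'.getD num 0 < 2 && PySem.Set.contains dups num then
          PySem.Set.discard dups num else dups with hdups'
      have hcnum := hc' num
      have hm' : ∀ x, x ∈ dups' ↔ 1 < rest'.count x := by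
        intro x
        rw [hdups']
        split_ifs with hcond
        · simp only [Bool.and_eq_true, decide_eq_true_eq] at hcond
          obtain ⟨hlt2, _⟩ := hcond
          rw [PySem.Set.mem_discard, hm x]
          by_cases hxy : x = num
          · subst hxy
            constructor
            · rintro ⟨_, hne2⟩; exact absurd rfl hne2
            · intro h; exfalso; rw [hcnum] at hlt2; omega
          · rw [List.count_cons_of_ne (Ne.symm hxy)]
            exact ⟨fun ⟨h, _⟩ => h, fun h => ⟨h, hxy⟩⟩
        · simp only [Bool.and_eq_true, decide_eq_true_eq, not_and] at hcond
          by_cases hxy : x = num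
          · subst hxy
            by_cases hlt2 : count'.getD x 0 < 2
            · have hnc : ¬ PySem.Set.contains dups x = true := hcond hlt2
              have hxd : x ∉ dups := fun h => hnc ((PySem.Set.contains_iff dups x).mpr h)
              rw [hcnum] at hlt2
              constructor
              · intro h; exact absurd h hxd
              · intro h; exfalso; omega
            · rw [hcnum] at hlt2
              rw [hm x, List.count_cons_self]
              constructor
              · intro _; omega
              · intro _; omega
          · rw [hm x, List.count_cons_of_ne (Ne.symm hxy)]
      rw [ih count' dups' (moves + 1) hc' hm']
      have hmd : minDrop (num :: rest') = minDrop rest' + 1 := by simp [minDrop, hnd]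
      rw [hmd]; push_cast; ring

lemma goAlt_spec (r : List Int) (s : List Int) (seen : PySem.Set Int)
    (hnd : s.Nodup) (hmem : ∀ y, y ∈ seen ↔ y ∈ s) :
    findMinMovesAltGo (r.length + s.length) seen s.length r
      = (minDrop (r.reverse ++ s) : Int) := by
  induction r generalizing s seen with
  | nil =>
    simp [findMinMovesAltGo, minDrop_of_nodup s hnd]
  | cons x r' ih =>
    rw [findMinMovesAltGo]
    by_cases hx : x ∈ s
    · have hcont : PySem.Set.contains seen x = true :=
        (PySem.Set.contains_iff seen x).mpr ((hmem x).mpr hx)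
      simp only [hcont, if_pos]
      have hmd : minDrop ((x :: r').reverse ++ s) = r'.length + 1 := by
        apply minDrop_eq_of
        · have h1 : (x :: r').reverse = r'.reverse ++ [x] := by simp
          rw [h1]
          have h2 : ((r'.reverse ++ [x]) ++ s).drop (r'.length + 1) = s := by
            rw [List.drop_append_of_le_length (by simp)]
            simp
          rw [h2]; exact hnd
        · intro k hk
          have h1 : (x :: r').reverse ++ s = r'.reverse ++ (x :: s) := by simp
          rw [h1]
          rw [List.drop_append_of_le_length (by simp; omega)]
          intro hcontra
          have hsuf : (x :: s).Sublist (r'.reverse.drop k ++ (x :: s)) :=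
            List.sublist_append_right _ _
          have := hcontra.sublist hsuf
          rw [List.nodup_cons] at this
          exact this.1 hx
      rw [hmd]
      push_cast
      simp
    · have hcont : PySem.Set.contains seen x = false := by
        by_contra h
        have : PySem.Set.contains seen x = true := by revert h; cases PySem.Set.contains seen x <;> simp
        exact hx ((hmem x).mp ((PySem.Set.contains_iff seen x).mp this))
      simp only [hcont, Bool.false_eq_true, if_neg, not_false_iff]
      have hnd' : (x :: s).Nodup := List.nodup_cons.mpr ⟨hx, hnd⟩
      have hmem' : ∀ y, y ∈ PySem.Set.add seen x ↔ y ∈ x :: s := by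
        intro y
        rw [PySem.Set.mem_add, hmem y]
        simp [List.mem_cons]
        tauto
      have harith : (x :: r').length + s.length = r'.length + (x :: s).length := by
        simp; omega
      rw [harith]
      have hs : s.length + 1 = (x :: s).length := by simp
      rw [hs]
      rw [ih (x :: s) (PySem.Set.add seen x) hnd' hmem']
      congr 2
      simp

-- ===== VERDICT (by name: the statement is the Claim_ definition above) =====
theorem findMinMoves_spec : Claim_equal_findMinMoves := by
  intro nums _
  unfold Spec_findMinMoves
  simp only [findMinMoves, findMinMoves_alt]
  set cd := nums.foldl findMinMovesStep (PySem.Dict.empty, PySem.Set.empty) with hcd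
  have hbuild := fun x => buildA_spec nums PySem.Dict.empty PySem.Set.empty
    (by intro y; simp) x
  have hc : ∀ x, cd.1.getD x 0 = (nums.count x : Int) := by
    intro x; have := (hbuild x).1; rw [hcd]; simpa using this
  have hm : ∀ x, x ∈ cd.2 ↔ 1 < nums.count x := by
    intro x
    have h2 := (hbuild x).2
    rw [hcd, h2]
    constructor
    · rintro (h | ⟨_, h⟩)
      · simp [PySem.Set.empty] at h
      · simp only [PySem.Dict.getD_empty, zero_add, gt_iff_lt] at h
        exact_mod_cast h
    · intro h
      refine Or.inr ⟨List.count_pos_iff.mp (by omega), ?_⟩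
      simp only [PySem.Dict.getD_empty, zero_add, gt_iff_lt]
      exact_mod_cast h
  rw [loopA_spec nums cd.1 cd.2 0 hc hm]
  have hB := goAlt_spec nums.reverse [] PySem.Set.empty List.nodup_nil
    (by intro y; simp [PySem.Set.empty])
  simp only [List.length_nil, Nat.add_zero, List.append_nil, List.reverse_reverse,
    List.length_reverse] at hB
  rw [hB]
  ring
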